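-- pv_equiv track=rewrite | github.com/monk-time/algorithms | shbr3/e_brewing_potions.py | max_sum_quality
-- ===== SOURCE A (Python) =====
-- from itertools import accumulate
--
-- MAX_QUALITY = 2 * 10**6
--
-- def check(
--     min_quality: int, prefix_sums: list[int], quality: list[int], k: int
-- ) -> int | None:
--     count, total = 0, 0
--     for qual in quality:
--         if qual < min_quality:
--             break
--         count += 1
--         total += qual
--     j = 1
--     while j < len(quality) and quality[0] + quality[j] >= min_quality:
--         j += 1
--     for i in range(len(quality)):
--         if i + 1 >= j:
--             break
--         while j - 1 > i and quality[i] + quality[j - 1] < min_quality: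
--             j -= 1
--         cur_count = j - i - 1
--         count += cur_count
--         total += prefix_sums[j - 1] - prefix_sums[i] + quality[i] * cur_count
--     if count >= k:
--         return total - (count - k) * min_quality
--     return None
--
-- def max_sum_quality(quality: list[int], k: int) -> int | None:
--     quality.sort(reverse=True)
--     prefix_sums = list(accumulate(quality))
--     left, right = -MAX_QUALITY, MAX_QUALITY
--     while left < right:
--         mid = (left + right + 1) // 2
--         if check(mid, prefix_sums, quality, k) is None:
--             right = mid - 1
--         else:
--             left = mid
--     return check(left, prefix_sums, quality, k)
-- ===== SOURCE B (Python) =====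
-- MAX_QUALITY = 2 * 10**6
--
-- def first_below(lo, hi, good):
--     # first index t in [lo, hi) with not good(t); hi if none (good holds on a prefix)
--     while lo < hi:
--         mid = (lo + hi) // 2
--         if good(mid):
--             lo = mid + 1
--         else:
--             hi = mid
--     return lo
--
-- def check(min_quality, prefix_sums, quality, k):
--     n = len(quality)
--     t = first_below(0, n, lambda idx: quality[idx] >= min_quality)
--     count = t
--     total = prefix_sums[t - 1] if t else 0
--     for i in range(n):
--         j = first_below(i + 1, n, lambda idx: quality[i] + quality[idx] >= min_quality)
--         cur = j - i - 1
--         count += cur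
--         total += prefix_sums[j - 1] - prefix_sums[i] + quality[i] * cur
--     if count >= k:
--         return total - (count - k) * min_quality
--     return None
--
-- def max_sum_quality(quality, k):
--     quality.sort(reverse=True)
--     prefix_sums = []
--     running = 0
--     for q in quality:
--         running += q
--         prefix_sums.append(running)
--     best = -MAX_QUALITY
--     step = 1 << 22
--     while step:
--         cand = best + step
--         if cand <= MAX_QUALITY and check(cand, prefix_sums, quality, k) is not None:
--             best = cand
--         step >>= 1
--     return check(best, prefix_sums, quality, k)
-- ===== Notes on version B (the rewrite author's own statement) =====
-- stated objective: alternative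
-- what changed: check's monotone two-pointer sweep (and the linear singles scan) are replaced by a generic binary search used per element and for the singles boundary with a prefix-sum lookup, prefix sums are built by an explicit running loop instead of accumulate, and the outer midpoint interval binary search over the value range is replaced by binary lifting with decreasing power-of-two steps.
import Mathlib
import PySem

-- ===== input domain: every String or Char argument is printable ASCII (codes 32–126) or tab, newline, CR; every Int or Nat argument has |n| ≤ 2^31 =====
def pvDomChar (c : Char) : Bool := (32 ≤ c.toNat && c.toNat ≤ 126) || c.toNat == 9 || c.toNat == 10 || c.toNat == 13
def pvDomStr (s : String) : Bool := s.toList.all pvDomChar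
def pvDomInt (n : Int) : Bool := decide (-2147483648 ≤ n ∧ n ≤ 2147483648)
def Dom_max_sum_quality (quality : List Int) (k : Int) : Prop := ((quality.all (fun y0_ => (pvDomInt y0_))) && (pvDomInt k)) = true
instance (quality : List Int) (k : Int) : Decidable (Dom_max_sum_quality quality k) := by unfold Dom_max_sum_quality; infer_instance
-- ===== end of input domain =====

-- B replaces check's two-pointer sweep (and linear singles scan) by per-element binary
-- searches with prefix-sum lookups, and the outer interval binary search by binary lifting
-- (objective: alternative, same results; both Pythons sort the argument list in place —
-- the equivalence proved here is about the return value only).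

-- ===== PORT A =====

def pvMaxQuality : Int := 2 * 10 ^ 6

-- first loop of check: count/total of the leading elements ≥ min_quality (breaks at the first smaller one)
def pvSinglesA (m : Int) (q : List Int) (count total : Int) : Int × Int :=
  match q with
  | [] => (count, total)
  | qual :: rest => if qual < m then (count, total) else pvSinglesA m rest (count + 1) (total + qual)

-- `while j < len(quality) and quality[0] + quality[j] >= min_quality: j += 1`
def pvInitJA (m : Int) (q : List Int) (j : Nat) : Nat :=
  if h : j < q.length ∧ q.getD 0 0 + q.getD j 0 ≥ m then pvInitJA m q (j + 1) else j
termination_by q.length - j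
decreasing_by omega

-- `while j - 1 > i and quality[i] + quality[j - 1] < min_quality: j -= 1`
-- (structural on j: for j = jj+1 the condition `j - 1 > i` is `i < jj` and `quality[j-1]` is `q[jj]`)
def pvInnerA (m qi : Int) (q : List Int) (i : Nat) : Nat → Nat
  | 0 => 0
  | jj + 1 => if i < jj ∧ qi + q.getD jj 0 < m then pvInnerA m qi q i jj else jj + 1

-- `for i in range(len(quality)): if i + 1 >= j: break; …` — the local value of j after the inner
-- while is written out (recomputed) at each of its three uses; it is the same value each time.
def pvOuterA (m : Int) (ps q : List Int) (i j : Nat) (count total : Int) : Int × Int :=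
  if h : i < q.length then
    if i + 1 ≥ j then (count, total)
    else
      pvOuterA m ps q (i + 1) (pvInnerA m (q.getD i 0) q i j)
        (count + ((pvInnerA m (q.getD i 0) q i j : Int) - (i : Int) - 1))
        (total + (ps.getD (pvInnerA m (q.getD i 0) q i j - 1) 0 - ps.getD i 0
                  + q.getD i 0 * ((pvInnerA m (q.getD i 0) q i j : Int) - (i : Int) - 1)))
  else (count, total)
termination_by q.length - i
decreasing_by omega

def pvFinishA (p : Int × Int) (m k : Int) : Option Int :=
  if p.1 ≥ k then some (p.2 - (p.1 - k) * m) else none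

def pvCheckA (m : Int) (ps q : List Int) (k : Int) : Option Int :=
  pvFinishA (pvOuterA m ps q 0 (pvInitJA m q 1) (pvSinglesA m q 0 0).1 (pvSinglesA m q 0 0).2) m k

-- `list(accumulate(quality))`
def pvAccumA (acc : Int) (q : List Int) : List Int :=
  match q with
  | [] => []
  | x :: xs => (acc + x) :: pvAccumA (acc + x) xs

def pvBsearchA (ps q : List Int) (k l r : Int) : Int :=
  if h : l < r then
    if pvCheckA (PySem.Int.floordiv (l + r + 1) 2) ps q k = none then
      pvBsearchA ps q k l (PySem.Int.floordiv (l + r + 1) 2 - 1)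
    else
      pvBsearchA ps q k (PySem.Int.floordiv (l + r + 1) 2) r
  else l
termination_by (r - l).toNat
decreasing_by
  · rw [PySem.Int.floordiv_eq_ediv_of_pos (by norm_num : (0:Int) < 2)]; omega
  · rw [PySem.Int.floordiv_eq_ediv_of_pos (by norm_num : (0:Int) < 2)]; omega

def max_sum_quality (quality : List Int) (k : Int) : Option Int :=
  let q := PySem.List.sorted quality (fun x => x) true
  let ps := pvAccumA 0 q
  pvCheckA (pvBsearchA ps q k (-pvMaxQuality) pvMaxQuality) ps q k

-- ===== PORT B =====

-- `first_below(lo, hi, good)`: binary search for the first index in [lo, hi) where good fails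
def pvFirstBelow (good : Nat → Bool) (lo hi : Nat) : Nat :=
  if h : lo < hi then
    if good ((lo + hi) / 2) then pvFirstBelow good ((lo + hi) / 2 + 1) hi
    else pvFirstBelow good lo ((lo + hi) / 2)
  else lo
termination_by hi - lo
decreasing_by
  · omega
  · omega

-- `for i in range(n): j = first_below(i+1, n, …); …` — the local binary-search result j is
-- written out (recomputed) at each of its uses; it is the same value each time.
def pvPairsB (m : Int) (ps q : List Int) (i : Nat) (count total : Int) : Int × Int :=
  if h : i < q.length then
    pvPairsB m ps q (i + 1)
      (count + ((pvFirstBelow (fun idx => decide (q.getD i 0 + q.getD idx 0 ≥ m)) (i + 1) q.length : Int) - (i : Int) - 1))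
      (total + (ps.getD (pvFirstBelow (fun idx => decide (q.getD i 0 + q.getD idx 0 ≥ m)) (i + 1) q.length - 1) 0
                - ps.getD i 0
                + q.getD i 0 * ((pvFirstBelow (fun idx => decide (q.getD i 0 + q.getD idx 0 ≥ m)) (i + 1) q.length : Int) - (i : Int) - 1)))
  else (count, total)
termination_by q.length - i
decreasing_by omega

def pvCheckB (m : Int) (ps q : List Int) (k : Int) : Option Int :=
  let t := pvFirstBelow (fun idx => decide (q.getD idx 0 ≥ m)) 0 q.length
  let p := pvPairsB m ps q 0 (t : Int) (if t = 0 then 0 else ps.getD (t - 1) 0)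
  if p.1 ≥ k then some (p.2 - (p.1 - k) * m) else none

-- `running = 0; for q in quality: running += q; prefix_sums.append(running)`
def pvPrefixB (q : List Int) : List Int :=
  (q.foldl (fun (st : Int × List Int) x => (st.1 + x, st.2 ++ [st.1 + x])) (0, [])).2

-- `step = 1 << 22; while step: cand = best + step; …; step >>= 1`
def pvLiftB (ps q : List Int) (k best : Int) (step : Nat) : Int :=
  if h : step ≠ 0 then
    pvLiftB ps q k
      (if best + (step : Int) ≤ pvMaxQuality ∧ pvCheckB (best + (step : Int)) ps q k ≠ none
       then best + (step : Int) else best)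
      (step / 2)
  else best
termination_by step
decreasing_by omega

def max_sum_quality_alt (quality : List Int) (k : Int) : Option Int :=
  let q := PySem.List.sorted quality (fun x => x) true
  let ps := pvPrefixB q
  pvCheckB (pvLiftB ps q k (-pvMaxQuality) 4194304) ps q k

-- ===== PRECONDITION & SPEC =====
def Spec_max_sum_quality (quality : List Int) (k : Int) (out : Option Int) : Prop := out = max_sum_quality_alt quality k
instance (quality : List Int) (k : Int) (out : Option Int) : Decidable (Spec_max_sum_quality quality k out) := by unfold Spec_max_sum_quality; infer_instance

-- ===== CLAIM (what is proved, stated in full; the proofs are below) =====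
def Claim_equal_max_sum_quality : Prop := ∀ (quality : List Int) (k : Int), Dom_max_sum_quality quality k → Spec_max_sum_quality quality k (max_sum_quality quality k)

-- ===== LEMMAS AND PROOFS =====

-- descending-sortedness in getD form
def PvSorted (q : List Int) : Prop :=
  ∀ a b : Nat, a ≤ b → b < q.length → q.getD b 0 ≤ q.getD a 0

lemma pvSorted_of_pairwise (q : List Int) (hp : List.Pairwise (fun a b : Int => b ≤ a) q) :
    PvSorted q := by
  intro a b hab hb
  have ha : a < q.length := Nat.lt_of_le_of_lt hab hb
  rcases Nat.eq_or_lt_of_le hab with rfl | hlt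
  · exact le_rfl
  · rw [List.getD_eq_getElem _ _ hb, List.getD_eq_getElem _ _ ha]
    exact List.pairwise_iff_getElem.mp hp a b ha hb hlt

-- A's break-at-first-small loop is takeWhile
lemma pvSinglesA_eq (m : Int) :
    ∀ (q : List Int) (c t : Int),
      pvSinglesA m q c t =
        (c + ((q.takeWhile (fun x => decide (m ≤ x))).length : Int),
         t + (q.takeWhile (fun x => decide (m ≤ x))).sum) := by
  intro q
  induction q with
  | nil => intro c t; simp [pvSinglesA]
  | cons x xs ih =>
    intro c t
    by_cases hx : x < m
    · have : ¬ (m ≤ x) := by omega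
      simp [pvSinglesA, List.takeWhile, hx, this]
    · have hmx : m ≤ x := by omega
      simp only [pvSinglesA, if_neg hx, ih,
        List.takeWhile_cons_of_pos (p := fun x => decide (m ≤ x)) (by simpa using hmx),
        List.length_cons, List.sum_cons, Prod.mk.injEq]
      push_cast
      constructor <;> ring

lemma pvInitJA_spec (m : Int) (q : List Int) :
    ∀ (fuel j : Nat), q.length - j ≤ fuel →
      j ≤ pvInitJA m q j ∧ (j ≤ q.length → pvInitJA m q j ≤ q.length) ∧
      (pvInitJA m q j < q.length → q.getD 0 0 + q.getD (pvInitJA m q j) 0 < m) := by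
  intro fuel
  induction fuel with
  | zero =>
    intro j hf
    rw [pvInitJA.eq_def]
    by_cases h : j < q.length ∧ q.getD 0 0 + q.getD j 0 ≥ m
    · omega
    · rw [dif_neg h]
      refine ⟨le_rfl, fun h1 => h1, fun h2 => ?_⟩
      rcases not_and_or.mp h with hc | hc
      · exact absurd h2 hc
      · omega
  | succ f ih =>
    intro j hf
    rw [pvInitJA.eq_def]
    by_cases h : j < q.length ∧ q.getD 0 0 + q.getD j 0 ≥ m
    · rw [dif_pos h]
      have := ih (j + 1) (by omega)
      exact ⟨by omega, fun _ => this.2.1 (by omega), this.2.2⟩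
    · rw [dif_neg h]
      refine ⟨le_rfl, fun h1 => h1, fun h2 => ?_⟩
      rcases not_and_or.mp h with hc | hc
      · exact absurd h2 hc
      · omega

lemma pvInnerA_spec (m qi : Int) (q : List Int) (i : Nat) :
    ∀ j : Nat, i + 1 ≤ j →
      i + 1 ≤ pvInnerA m qi q i j ∧ pvInnerA m qi q i j ≤ j ∧
      (∀ t, pvInnerA m qi q i j ≤ t → t < j → qi + q.getD t 0 < m) ∧
      (i + 1 < pvInnerA m qi q i j → m ≤ qi + q.getD (pvInnerA m qi q i j - 1) 0) := by
  intro j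
  induction j with
  | zero => intro hj; omega
  | succ jj ih =>
    intro hj
    by_cases h : i < jj ∧ qi + q.getD jj 0 < m
    · have hrw : pvInnerA m qi q i (jj + 1) = pvInnerA m qi q i jj := by
        show (if i < jj ∧ qi + q.getD jj 0 < m then pvInnerA m qi q i jj else jj + 1) =
          pvInnerA m qi q i jj
        rw [if_pos h]
      have := ih (by omega)
      rw [hrw]
      refine ⟨this.1, by omega, fun t ht1 ht2 => ?_, this.2.2.2⟩
      rcases Nat.lt_or_ge t jj with hlt | hge
      · exact this.2.2.1 t ht1 hlt
      · have : t = jj := by omega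
        rw [this]; exact h.2
    · have hrw : pvInnerA m qi q i (jj + 1) = jj + 1 := by
        show (if i < jj ∧ qi + q.getD jj 0 < m then pvInnerA m qi q i jj else jj + 1) = jj + 1
        rw [if_neg h]
      rw [hrw]
      refine ⟨hj, le_rfl, fun t ht1 ht2 => by omega, fun hlt => ?_⟩
      have hjj1 : jj + 1 - 1 = jj := by omega
      rw [hjj1]
      rcases not_and_or.mp h with hc | hc
      · omega
      · omega

-- generic spec of the binary search: first failing index of a prefix-true predicate
lemma pvFirstBelow_spec (good : Nat → Bool) :
    ∀ (fuel lo hi : Nat), hi - lo ≤ fuel → lo ≤ hi →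
      (∀ t t' : Nat, lo ≤ t → t ≤ t' → t' < hi → good t = false → good t' = false) →
      lo ≤ pvFirstBelow good lo hi ∧ pvFirstBelow good lo hi ≤ hi ∧
      (∀ t, lo ≤ t → t < pvFirstBelow good lo hi → good t = true) ∧
      (pvFirstBelow good lo hi < hi → good (pvFirstBelow good lo hi) = false) := by
  intro fuel
  induction fuel with
  | zero =>
    intro lo hi hf hle hmono
    have : lo = hi := by omega
    subst this
    rw [pvFirstBelow.eq_def, dif_neg (by omega : ¬ lo < lo)]
    exact ⟨le_rfl, le_rfl, fun t h1 h2 => by omega, fun h => by omega⟩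
  | succ f ih =>
    intro lo hi hf hle hmono
    rw [pvFirstBelow.eq_def]
    by_cases hlt : lo < hi
    · rw [dif_pos hlt]
      by_cases hcmp : good ((lo + hi) / 2) = true
      · rw [if_pos hcmp]
        have ih' := ih ((lo + hi) / 2 + 1) hi (by omega) (by omega)
          (fun t t' h1 h2 h3 hP => hmono t t' (by omega) h2 h3 hP)
        refine ⟨by omega, ih'.2.1, fun t ht1 ht2 => ?_, ih'.2.2.2⟩
        rcases Nat.lt_or_ge t ((lo + hi) / 2 + 1) with hl | hg
        · by_cases hgt : good t = true
          · exact hgt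
          · exfalso
            have hft : good t = false := by simpa using hgt
            have := hmono t ((lo + hi) / 2) ht1 (by omega) (by omega) hft
            rw [this] at hcmp
            exact Bool.false_ne_true hcmp
        · exact ih'.2.2.1 t hg ht2
      · rw [if_neg hcmp]
        have hfm : good ((lo + hi) / 2) = false := by simpa using hcmp
        have ih' := ih lo ((lo + hi) / 2) (by omega) (by omega)
          (fun t t' h1 h2 h3 hP => hmono t t' h1 h2 (by omega) hP)
        refine ⟨ih'.1, by omega, ih'.2.2.1, fun hr => ?_⟩
        rcases Nat.lt_or_ge (pvFirstBelow good lo ((lo + hi) / 2)) ((lo + hi) / 2) with hl | hg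
        · exact ih'.2.2.2 hl
        · have : pvFirstBelow good lo ((lo + hi) / 2) = (lo + hi) / 2 := by omega
          rw [this]; exact hfm
    · rw [dif_neg hlt]
      exact ⟨le_rfl, by omega, fun t h1 h2 => by omega, fun h => by omega⟩

-- the pair search, in arithmetic form
lemma pvPairFB_spec (m : Int) (q : List Int) (hs : PvSorted q) (i : Nat) (hi : i < q.length) :
    i + 1 ≤ pvFirstBelow (fun idx => decide (q.getD i 0 + q.getD idx 0 ≥ m)) (i + 1) q.length ∧
    pvFirstBelow (fun idx => decide (q.getD i 0 + q.getD idx 0 ≥ m)) (i + 1) q.length ≤ q.length ∧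
    (∀ t, i + 1 ≤ t → t < pvFirstBelow (fun idx => decide (q.getD i 0 + q.getD idx 0 ≥ m)) (i + 1) q.length →
      m ≤ q.getD i 0 + q.getD t 0) ∧
    (pvFirstBelow (fun idx => decide (q.getD i 0 + q.getD idx 0 ≥ m)) (i + 1) q.length < q.length →
      q.getD i 0 + q.getD (pvFirstBelow (fun idx => decide (q.getD i 0 + q.getD idx 0 ≥ m)) (i + 1) q.length) 0 < m) := by
  have h := pvFirstBelow_spec (fun idx => decide (q.getD i 0 + q.getD idx 0 ≥ m)) q.length (i + 1) q.length
    (by omega) (by omega)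
    (fun t t' h1 h2 h3 hP => by
      have h4 := hs t t' h2 h3
      simp only [ge_iff_le, decide_eq_false_iff_not, not_le] at hP ⊢
      omega)
  refine ⟨h.1, h.2.1, fun t h1 h2 => ?_, fun hlt => ?_⟩
  · have := h.2.2.1 t h1 h2
    simpa using this
  · have := h.2.2.2 hlt
    simp only [ge_iff_le, decide_eq_false_iff_not, not_le] at this
    exact this

-- the singles search, in arithmetic form
lemma pvSingleFB_spec (m : Int) (q : List Int) (hs : PvSorted q) :
    pvFirstBelow (fun idx => decide (q.getD idx 0 ≥ m)) 0 q.length ≤ q.length ∧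
    (∀ t, t < pvFirstBelow (fun idx => decide (q.getD idx 0 ≥ m)) 0 q.length → m ≤ q.getD t 0) ∧
    (pvFirstBelow (fun idx => decide (q.getD idx 0 ≥ m)) 0 q.length < q.length →
      q.getD (pvFirstBelow (fun idx => decide (q.getD idx 0 ≥ m)) 0 q.length) 0 < m) := by
  have h := pvFirstBelow_spec (fun idx => decide (q.getD idx 0 ≥ m)) q.length 0 q.length
    (by omega) (by omega)
    (fun t t' h1 h2 h3 hP => by
      have h4 := hs t t' h2 h3
      simp only [ge_iff_le, decide_eq_false_iff_not, not_le] at hP ⊢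
      omega)
  refine ⟨h.2.1, fun t h2 => ?_, fun hlt => ?_⟩
  · have := h.2.2.1 t (by omega) h2
    simpa using this
  · have := h.2.2.2 hlt
    simp only [ge_iff_le, decide_eq_false_iff_not, not_le] at this
    exact this

-- once all adjacent later pairs fail, B's loop adds nothing
lemma pvTailB (m : Int) (ps q : List Int) (hs : PvSorted q) :
    ∀ (fuel i : Nat) (c t : Int), q.length - i ≤ fuel →
      (∀ i', i ≤ i' → i' + 1 < q.length → q.getD i' 0 + q.getD (i' + 1) 0 < m) →
      pvPairsB m ps q i c t = (c, t) := by
  intro fuel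
  induction fuel with
  | zero =>
    intro i c t hf hadj
    rw [pvPairsB.eq_def, dif_neg (by omega : ¬ i < q.length)]
  | succ f ih =>
    intro i c t hf hadj
    rw [pvPairsB.eq_def]
    by_cases hi : i < q.length
    · rw [dif_pos hi]
      have hspec := pvPairFB_spec m q hs i hi
      have hj : pvFirstBelow (fun idx => decide (q.getD i 0 + q.getD idx 0 ≥ m)) (i + 1) q.length = i + 1 := by
        by_contra hne
        have hgt : i + 1 < pvFirstBelow (fun idx => decide (q.getD i 0 + q.getD idx 0 ≥ m)) (i + 1) q.length := by
          have := hspec.1; omega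
        have hsucc := hspec.2.2.1 (i + 1) le_rfl hgt
        have hfail := hadj i le_rfl (by have := hspec.2.1; omega)
        omega
      rw [hj]
      have h1 : i + 1 - 1 = i := by omega
      rw [h1]
      have e1 : c + (((i + 1 : Nat) : Int) - (i : Nat) - 1) = c := by push_cast; ring
      have e2 : t + (ps.getD i 0 - ps.getD i 0 + q.getD i 0 * (((i + 1 : Nat) : Int) - (i : Nat) - 1)) = t := by
        push_cast; ring
      rw [e1, e2]
      exact ih (i + 1) c t (by omega) (fun i' ha hb => hadj i' (by omega) hb)
    · rw [dif_neg hi]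

-- the main loop correspondence: A's two-pointer sweep equals B's per-element binary search
lemma pvLoopEq (m : Int) (ps q : List Int) (hs : PvSorted q) :
    ∀ (fuel i j : Nat) (c t : Int), q.length - i ≤ fuel →
      (i < q.length → j ≤ q.length ∧
        ∀ tt, j ≤ tt → tt < q.length → q.getD (i - 1) 0 + q.getD tt 0 < m) →
      pvOuterA m ps q i j c t = pvPairsB m ps q i c t := by
  intro fuel
  induction fuel with
  | zero =>
    intro i j c t hf hinv
    rw [pvOuterA.eq_def, dif_neg (by omega : ¬ i < q.length),
        pvPairsB.eq_def, dif_neg (by omega : ¬ i < q.length)]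
  | succ f ih =>
    intro i j c t hf hinv
    by_cases hi : i < q.length
    · obtain ⟨hjn, hINV⟩ := hinv hi
      rw [pvOuterA.eq_def, dif_pos hi]
      by_cases hj : i + 1 ≥ j
      · rw [if_pos hj]
        refine (pvTailB m ps q hs q.length i c t (by omega) ?_).symm
        intro i' h1 h2
        have hA := hINV (i' + 1) (by omega) h2
        have hB := hs (i - 1) i' (by omega) (by omega)
        omega
      · rw [if_neg hj]
        push_neg at hj
        -- inner-while result and binary-search result coincide
        have hIA := pvInnerA_spec m (q.getD i 0) q i j (by omega)
        have hIB := pvPairFB_spec m q hs i hi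
        set j' := pvInnerA m (q.getD i 0) q i j with hj'
        set jb := pvFirstBelow (fun idx => decide (q.getD i 0 + q.getD idx 0 ≥ m)) (i + 1) q.length with hjb
        have hq1 : 1 ≤ q.length := by omega
        have hjj : jb = j' := by
          rcases lt_trichotomy jb j' with hlt | heq | hgt
          · exfalso
            have hlast := hIA.2.2.2 (by omega)
            have hfail : q.getD i 0 + q.getD jb 0 < m := hIB.2.2.2 (by omega)
            have hmono := hs jb (j' - 1) (by omega) (by omega)
            omega
          · exact heq
          · exfalso
            have hsucc := hIB.2.2.1 j' hIA.1 hgt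
            have hfail : q.getD i 0 + q.getD j' 0 < m := by
              rcases Nat.lt_or_ge j' j with hlt2 | hge2
              · exact hIA.2.2.1 j' le_rfl hlt2
              · have hj'eq : j' = j := by omega
                rw [hj'eq]
                have h1 := hINV j le_rfl (by omega)
                have h2 := hs (i - 1) i (by omega) hi
                omega
            omega
        rw [pvPairsB.eq_def, dif_pos hi, ← hjb, hjj]
        exact ih (i + 1) j' _ _ (by omega) (fun _ => ⟨by omega, fun tt ht1 ht2 => by
          have hii : i + 1 - 1 = i := by omega
          rw [hii]
          rcases Nat.lt_or_ge tt j with hlt | hge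
          · exact hIA.2.2.1 tt ht1 hlt
          · have h1 := hINV tt hge ht2
            have h2 := hs (i - 1) i (by omega) hi
            omega⟩)
    · rw [pvOuterA.eq_def, dif_neg hi, pvPairsB.eq_def, dif_neg hi]

-- prefix-sum facts
lemma pvPrefixB_aux :
    ∀ (q : List Int) (s : Int) (acc : List Int),
      (q.foldl (fun (st : Int × List Int) x => (st.1 + x, st.2 ++ [st.1 + x])) (s, acc)).2
        = acc ++ pvAccumA s q := by
  intro q
  induction q with
  | nil => intro s acc; simp [pvAccumA]
  | cons x xs ih =>
    intro s acc
    rw [List.foldl_cons]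
    show (xs.foldl _ (s + x, acc ++ [s + x])).2 = _
    rw [ih]
    simp [pvAccumA]

lemma pvPrefixB_eq (q : List Int) : pvPrefixB q = pvAccumA 0 q := by
  unfold pvPrefixB
  rw [pvPrefixB_aux]
  simp

lemma pvAccumA_getD : ∀ (q : List Int) (acc : Int) (j : Nat), j < q.length →
    (pvAccumA acc q).getD j 0 = acc + (q.take (j + 1)).sum := by
  intro q
  induction q with
  | nil => intro acc j h; simp at h
  | cons x xs ih =>
    intro acc j h
    cases j with
    | zero => simp [pvAccumA]
    | succ jj =>
      simp only [pvAccumA, List.getD_cons_succ, List.take_succ_cons, List.sum_cons]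
      rw [ih (acc + x) jj (by simpa using h)]
      ring

-- takeWhile boundary facts
lemma pvTW_true : ∀ (q : List Int) (p : Int → Bool) (idx : Nat),
    idx < (q.takeWhile p).length → p (q.getD idx 0) = true := by
  intro q
  induction q with
  | nil => intro p idx h; simp at h
  | cons x xs ih =>
    intro p idx h
    by_cases hx : p x = true
    · rw [List.takeWhile_cons_of_pos hx] at h
      cases idx with
      | zero => simpa using hx
      | succ jj => exact ih p jj (by simpa using h)
    · rw [List.takeWhile_cons_of_neg (by simpa using hx)] at h
      simp at h

lemma pvTW_false : ∀ (q : List Int) (p : Int → Bool),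
    (q.takeWhile p).length < q.length → p (q.getD (q.takeWhile p).length 0) = false := by
  intro q
  induction q with
  | nil => intro p h; simp at h
  | cons x xs ih =>
    intro p h
    by_cases hx : p x = true
    · rw [List.takeWhile_cons_of_pos hx] at h ⊢
      simpa using ih p (by simpa using h)
    · rw [List.takeWhile_cons_of_neg (by simpa using hx)]
      simpa using hx

lemma pvTW_sum_take (q : List Int) (p : Int → Bool) :
    (q.takeWhile p).sum = (q.take (q.takeWhile p).length).sum := by
  have hpre : q.takeWhile p = q.take (q.takeWhile p).length := by
    have h := List.takeWhile_prefix (l := q) p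
    exact (List.prefix_iff_eq_take.mp h)
  rw [← hpre]

-- the singles binary search equals A's takeWhile count …
lemma pvSinglesFB_count (m : Int) (q : List Int) (hs : PvSorted q) :
    pvFirstBelow (fun idx => decide (q.getD idx 0 ≥ m)) 0 q.length
      = (q.takeWhile (fun x => decide (m ≤ x))).length := by
  have hspec := pvSingleFB_spec m q hs
  have hL : (q.takeWhile (fun x => decide (m ≤ x))).length ≤ q.length :=
    (List.takeWhile_sublist _).length_le
  rcases lt_trichotomy (pvFirstBelow (fun idx => decide (q.getD idx 0 ≥ m)) 0 q.length)
    ((q.takeWhile (fun x => decide (m ≤ x))).length) with hlt | heq | hgt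
  · exfalso
    have h1 := pvTW_true q (fun x => decide (m ≤ x)) _ hlt
    simp only [decide_eq_true_eq] at h1
    have h2 := hspec.2.2 (by omega)
    omega
  · exact heq
  · exfalso
    have h1 := hspec.2.1 _ hgt
    have h2 := pvTW_false q (fun x => decide (m ≤ x)) (by omega)
    simp only [decide_eq_false_iff_not, not_le] at h2
    omega

-- … and its prefix-sum lookup equals A's takeWhile sum
lemma pvSinglesFB_total (m : Int) (q : List Int) (hs : PvSorted q) :
    (if pvFirstBelow (fun idx => decide (q.getD idx 0 ≥ m)) 0 q.length = 0 then 0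
     else (pvAccumA 0 q).getD (pvFirstBelow (fun idx => decide (q.getD idx 0 ≥ m)) 0 q.length - 1) 0)
      = (q.takeWhile (fun x => decide (m ≤ x))).sum := by
  rw [pvSinglesFB_count m q hs]
  have hL : (q.takeWhile (fun x => decide (m ≤ x))).length ≤ q.length :=
    (List.takeWhile_sublist _).length_le
  by_cases h0 : (q.takeWhile (fun x => decide (m ≤ x))).length = 0
  · rw [if_pos h0, List.length_eq_zero_iff.mp h0]
    simp
  · rw [if_neg h0,
      pvAccumA_getD q 0 ((q.takeWhile (fun x => decide (m ≤ x))).length - 1) (by omega)]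
    have hLL : (q.takeWhile (fun x => decide (m ≤ x))).length - 1 + 1
        = (q.takeWhile (fun x => decide (m ≤ x))).length := by omega
    rw [hLL, pvTW_sum_take q (fun x => decide (m ≤ x))]
    simp

lemma pvCheckEq (m : Int) (ps q : List Int) (k : Int) (hs : PvSorted q)
    (hps : ps = pvAccumA 0 q) :
    pvCheckA m ps q k = pvCheckB m ps q k := by
  have hq : q = [] ∨ 1 ≤ q.length := by cases q <;> simp
  unfold pvCheckA pvFinishA
  rw [pvSinglesA_eq]
  simp only [pvCheckB, zero_add]
  rw [hps, pvSinglesFB_total m q hs, pvSinglesFB_count m q hs]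
  rcases hq with rfl | hq1
  · rw [pvOuterA.eq_def, dif_neg (by simp), pvPairsB.eq_def, dif_neg (by simp)]
  · have hJ := pvInitJA_spec m q q.length 1 (by omega)
    rw [pvLoopEq m (pvAccumA 0 q) q hs q.length 0 (pvInitJA m q 1) _ _ (by omega) ?_]
    intro _
    refine ⟨hJ.2.1 hq1, fun tt ht1 ht2 => ?_⟩
    have hj0 : pvInitJA m q 1 < q.length := by omega
    have h1 := hJ.2.2 hj0
    have h2 := hs (pvInitJA m q 1) tt ht1 ht2
    have h0 : (0 : Nat) - 1 = 0 := by omega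
    rw [h0]
    omega

-- ===== monotonicity of check in the threshold =====

lemma pvFirstBelow_le (good good' : Nat → Bool) (lo hi : Nat) (hle : lo ≤ hi)
    (hmono : ∀ t t' : Nat, lo ≤ t → t ≤ t' → t' < hi → good t = false → good t' = false)
    (hmono' : ∀ t t' : Nat, lo ≤ t → t ≤ t' → t' < hi → good' t = false → good' t' = false)
    (himp : ∀ t, lo ≤ t → t < hi → good' t = true → good t = true) :
    pvFirstBelow good' lo hi ≤ pvFirstBelow good lo hi := by
  have h := pvFirstBelow_spec good hi lo hi (by omega) hle hmono
  have h' := pvFirstBelow_spec good' hi lo hi (by omega) hle hmono'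
  by_contra hc
  push_neg at hc
  have hbnd : pvFirstBelow good lo hi < hi := lt_of_lt_of_le hc h'.2.1
  have ht := h'.2.2.1 (pvFirstBelow good lo hi) h.1 hc
  have hf := h.2.2.2 hbnd
  have := himp _ h.1 hbnd ht
  rw [this] at hf
  simp at hf

lemma pvPairs_count_mono (m m' : Int) (ps ps' q : List Int) (hs : PvSorted q) (hmm : m ≤ m') :
    ∀ (fuel i : Nat) (c c' t t' : Int), q.length - i ≤ fuel → c' ≤ c →
      (pvPairsB m' ps' q i c' t').1 ≤ (pvPairsB m ps q i c t).1 := by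
  intro fuel
  induction fuel with
  | zero =>
    intro i c c' t t' hf hcc
    rw [pvPairsB.eq_def (count := c'), dif_neg (by omega : ¬ i < q.length),
        pvPairsB.eq_def (count := c), dif_neg (by omega : ¬ i < q.length)]
    exact hcc
  | succ f ih =>
    intro i c c' t t' hf hcc
    by_cases hi : i < q.length
    · rw [pvPairsB.eq_def (count := c'), dif_pos hi, pvPairsB.eq_def (count := c), dif_pos hi]
      have hj : pvFirstBelow (fun idx => decide (q.getD i 0 + q.getD idx 0 ≥ m')) (i + 1) q.length
          ≤ pvFirstBelow (fun idx => decide (q.getD i 0 + q.getD idx 0 ≥ m)) (i + 1) q.length := by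
        refine pvFirstBelow_le _ _ (i + 1) q.length (by omega) ?_ ?_ ?_
        · intro a b h1 h2 h3 hP
          have h4 := hs a b h2 h3
          simp only [ge_iff_le, decide_eq_false_iff_not, not_le] at hP ⊢
          omega
        · intro a b h1 h2 h3 hP
          have h4 := hs a b h2 h3
          simp only [ge_iff_le, decide_eq_false_iff_not, not_le] at hP ⊢
          omega
        · intro a h1 h2 hP
          simp only [ge_iff_le, decide_eq_true_eq] at hP ⊢
          omega
      have hjc : ((pvFirstBelow (fun idx => decide (q.getD i 0 + q.getD idx 0 ≥ m')) (i + 1) q.length : Nat) : Int)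
          ≤ ((pvFirstBelow (fun idx => decide (q.getD i 0 + q.getD idx 0 ≥ m)) (i + 1) q.length : Nat) : Int) :=
        Int.ofNat_le.mpr hj
      exact ih (i + 1) _ _ _ _ (by omega) (by omega)
    · rw [pvPairsB.eq_def (count := c'), dif_neg hi, pvPairsB.eq_def (count := c), dif_neg hi]
      exact hcc

lemma pvCheckB_mono (ps q : List Int) (k : Int) (hs : PvSorted q) :
    ∀ m m' : Int, m ≤ m' → pvCheckB m' ps q k ≠ none → pvCheckB m ps q k ≠ none := by
  intro m m' hmm h
  simp only [pvCheckB] at h ⊢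
  set t' := pvFirstBelow (fun idx => decide (q.getD idx 0 ≥ m')) 0 q.length with ht'
  set t := pvFirstBelow (fun idx => decide (q.getD idx 0 ≥ m)) 0 q.length with ht
  have htle : t' ≤ t := by
    refine pvFirstBelow_le _ _ 0 q.length (by omega) ?_ ?_ ?_
    · intro a b h1 h2 h3 hP
      have h4 := hs a b h2 h3
      simp only [ge_iff_le, decide_eq_false_iff_not, not_le] at hP ⊢
      omega
    · intro a b h1 h2 h3 hP
      have h4 := hs a b h2 h3
      simp only [ge_iff_le, decide_eq_false_iff_not, not_le] at hP ⊢
      omega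
    · intro a h1 h2 hP
      simp only [ge_iff_le, decide_eq_true_eq] at hP ⊢
      omega
  have hcnt : (pvPairsB m' ps q 0 (t' : Int) (if t' = 0 then 0 else ps.getD (t' - 1) 0)).1
      ≤ (pvPairsB m ps q 0 (t : Int) (if t = 0 then 0 else ps.getD (t - 1) 0)).1 :=
    pvPairs_count_mono m m' ps ps q hs hmm q.length 0 _ _ _ _ (by omega) (Int.ofNat_le.mpr htle)
  by_cases hc' : (pvPairsB m' ps q 0 (t' : Int) (if t' = 0 then 0 else ps.getD (t' - 1) 0)).1 ≥ k
  · rw [if_pos (by omega : (pvPairsB m ps q 0 (t : Int) (if t = 0 then 0 else ps.getD (t - 1) 0)).1 ≥ k)]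
    exact Option.some_ne_none _
  · rw [if_neg hc'] at h
    exact absurd rfl h

-- ===== the two outer searches find the same threshold =====

lemma pvBsearchA_spec (ps q : List Int) (k : Int)
    (hmono : ∀ m m' : Int, m ≤ m' → pvCheckA m' ps q k ≠ none → pvCheckA m ps q k ≠ none) :
    ∀ (fuel : Nat) (l r : Int), (r - l).toNat ≤ fuel → l ≤ r → r ≤ pvMaxQuality →
      (l = -pvMaxQuality ∨ pvCheckA l ps q k ≠ none) →
      (∀ m, r < m → m ≤ pvMaxQuality → pvCheckA m ps q k = none) →
      l ≤ pvBsearchA ps q k l r ∧ pvBsearchA ps q k l r ≤ r ∧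
      (pvBsearchA ps q k l r = -pvMaxQuality ∨ pvCheckA (pvBsearchA ps q k l r) ps q k ≠ none) ∧
      (∀ m, pvBsearchA ps q k l r < m → m ≤ pvMaxQuality → pvCheckA m ps q k = none) := by
  intro fuel
  induction fuel with
  | zero =>
    intro l r hf hle hrmax hP hN
    have : l = r := by omega
    subst this
    rw [pvBsearchA.eq_def, dif_neg (by omega : ¬ l < l)]
    exact ⟨le_rfl, le_rfl, hP, hN⟩
  | succ f ih =>
    intro l r hf hle hrmax hP hN
    rw [pvBsearchA.eq_def]
    by_cases hlr : l < r
    · rw [dif_pos hlr]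
      have hmid : l + 1 ≤ PySem.Int.floordiv (l + r + 1) 2 ∧ PySem.Int.floordiv (l + r + 1) 2 ≤ r := by
        rw [PySem.Int.floordiv_eq_ediv_of_pos (by norm_num : (0:Int) < 2)]
        omega
      by_cases hc : pvCheckA (PySem.Int.floordiv (l + r + 1) 2) ps q k = none
      · rw [if_pos hc]
        have ih' := ih l (PySem.Int.floordiv (l + r + 1) 2 - 1) (by omega) (by omega) (by omega) hP ?_
        · exact ⟨ih'.1, by omega, ih'.2.2.1, ih'.2.2.2⟩
        · intro m h1 h2
          rcases Int.lt_or_le m (PySem.Int.floordiv (l + r + 1) 2) with hm | hm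
          · omega
          · by_contra hne
            exact absurd (hmono (PySem.Int.floordiv (l + r + 1) 2) m hm hne) (fun hh => hh hc)
      · rw [if_neg hc]
        have ih' := ih (PySem.Int.floordiv (l + r + 1) 2) r (by omega) (by omega) hrmax (Or.inr hc) hN
        exact ⟨by omega, ih'.2.1, ih'.2.2.1, ih'.2.2.2⟩
    · rw [dif_neg hlr]
      have : l = r := by omega
      subst this
      exact ⟨le_rfl, le_rfl, hP, hN⟩

lemma pvLiftB_spec (ps q : List Int) (k : Int)
    (hmono : ∀ m m' : Int, m ≤ m' → pvCheckB m' ps q k ≠ none → pvCheckB m ps q k ≠ none) :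
    ∀ (e : Nat) (best : Int), -pvMaxQuality ≤ best → best ≤ pvMaxQuality →
      (best = -pvMaxQuality ∨ pvCheckB best ps q k ≠ none) →
      (∀ m, best + 2 * ((2 ^ e : Nat) : Int) ≤ m → m ≤ pvMaxQuality → pvCheckB m ps q k = none) →
      -pvMaxQuality ≤ pvLiftB ps q k best (2 ^ e) ∧ pvLiftB ps q k best (2 ^ e) ≤ pvMaxQuality ∧
      (pvLiftB ps q k best (2 ^ e) = -pvMaxQuality ∨ pvCheckB (pvLiftB ps q k best (2 ^ e)) ps q k ≠ none) ∧
      (∀ m, pvLiftB ps q k best (2 ^ e) + 1 ≤ m → m ≤ pvMaxQuality → pvCheckB m ps q k = none) := by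
  intro e
  induction e with
  | zero =>
    intro best hlb hub hP hH
    rw [pvLiftB.eq_def, dif_pos (by norm_num : (2 ^ 0 : Nat) ≠ 0)]
    have hs2 : ((2 ^ 0 : Nat) : Int) = 1 := by norm_num
    rw [pvLiftB.eq_def]
    simp only [pow_zero, Nat.reduceDiv, ne_eq, not_true_eq_false, false_implies, dif_neg,
      not_false_eq_true]
    by_cases hcond : best + ((1 : Nat) : Int) ≤ pvMaxQuality ∧ pvCheckB (best + ((1 : Nat) : Int)) ps q k ≠ none
    · rw [if_pos hcond]
      have h1 : ((1 : Nat) : Int) = 1 := by norm_num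
      refine ⟨by omega, by omega, Or.inr (by simpa [h1] using hcond.2), fun m hm1 hm2 => ?_⟩
      refine hH m ?_ hm2
      rw [hs2] at *
      omega
    · rw [if_neg hcond]
      refine ⟨hlb, hub, hP, fun m hm1 hm2 => ?_⟩
      rcases not_and_or.mp hcond with hc | hc
      · omega
      · push_neg at hc
        rcases Int.lt_or_le m (best + 2 * ((2 ^ 0 : Nat) : Int)) with hm | hm
        · have hmeq : m = best + 1 := by rw [hs2] at hm; omega
          by_contra hne
          have := hmono (best + ((1 : Nat) : Int)) m (by push_cast; omega) hne
          exact this hc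
        · exact hH m hm hm2
  | succ e ih =>
    intro best hlb hub hP hH
    have hS : (1 : Int) ≤ ((2 ^ e : Nat) : Int) := by
      have := Nat.one_le_two_pow (n := e)
      exact_mod_cast this
    have hcast : ((2 ^ (e + 1) : Nat) : Int) = 2 * ((2 ^ e : Nat) : Int) := by
      push_cast [pow_succ]
      ring
    have hdiv : (2 ^ (e + 1) : Nat) / 2 = 2 ^ e := by
      rw [pow_succ]
      exact Nat.mul_div_cancel _ (by norm_num)
    rw [pvLiftB.eq_def, dif_pos (by positivity), hdiv]
    by_cases hcond : best + ((2 ^ (e + 1) : Nat) : Int) ≤ pvMaxQuality ∧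
        pvCheckB (best + ((2 ^ (e + 1) : Nat) : Int)) ps q k ≠ none
    · rw [if_pos hcond]
      refine ih (best + ((2 ^ (e + 1) : Nat) : Int)) (by rw [hcast]; omega) hcond.1
        (Or.inr hcond.2) (fun m hm1 hm2 => hH m (by rw [hcast] at *; omega) hm2)
    · rw [if_neg hcond]
      refine ih best hlb hub hP (fun m hm1 hm2 => ?_)
      rcases not_and_or.mp hcond with hc | hc
      · rw [hcast] at *
        omega
      · push_neg at hc
        rcases Int.lt_or_le m (best + 2 * ((2 ^ (e + 1) : Nat) : Int)) with hm | hm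
        · by_contra hne
          have := hmono (best + ((2 ^ (e + 1) : Nat) : Int)) m (by rw [hcast] at *; omega) hne
          exact this hc
        · exact hH m (by rw [hcast] at *; omega) hm2

-- ===== VERDICT (by name: the statement is the Claim_ definition above) =====
theorem max_sum_quality_spec : Claim_equal_max_sum_quality := by
  intro quality k _
  unfold Spec_max_sum_quality max_sum_quality max_sum_quality_alt
  simp only []
  set q := PySem.List.sorted quality (fun x => x) true with hq
  have hs : PvSorted q := pvSorted_of_pairwise _ (by simpa using PySem.List.sorted_pairwise_rev quality (fun x => x))
  rw [pvPrefixB_eq]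
  set ps := pvAccumA 0 q with hpsdef
  have hceq : ∀ m k', pvCheckA m ps q k' = pvCheckB m ps q k' :=
    fun m k' => pvCheckEq m ps q k' hs hpsdef
  have hmono : ∀ m m' : Int, m ≤ m' → pvCheckB m' ps q k ≠ none → pvCheckB m ps q k ≠ none :=
    pvCheckB_mono ps q k hs
  have hmonoA : ∀ m m' : Int, m ≤ m' → pvCheckA m' ps q k ≠ none → pvCheckA m ps q k ≠ none := by
    intro m m' h
    rw [hceq, hceq]
    exact hmono m m' h
  have hA := pvBsearchA_spec ps q k hmonoA (pvMaxQuality - -pvMaxQuality).toNat (-pvMaxQuality) pvMaxQuality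
    le_rfl (by unfold pvMaxQuality; omega) le_rfl (Or.inl rfl)
    (fun m h1 h2 => absurd (lt_of_lt_of_le h1 h2) (lt_irrefl _))
  have h22 : (4194304 : Nat) = 2 ^ 22 := by norm_num
  have hB := pvLiftB_spec ps q k hmono 22 (-pvMaxQuality)
    le_rfl (by unfold pvMaxQuality; omega) (Or.inl rfl)
    (fun m h1 h2 => by
      exfalso
      have hc : ((2 ^ 22 : Nat) : Int) = 4194304 := by norm_num
      rw [hc] at h1
      unfold pvMaxQuality at h1 h2
      omega)
  rw [h22]
  set xA := pvBsearchA ps q k (-pvMaxQuality) pvMaxQuality with hxA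
  set xB := pvLiftB ps q k (-pvMaxQuality) (2 ^ 22) with hxB
  have hxeq : xA = xB := by
    rcases lt_trichotomy xA xB with hlt | heq | hgt
    · exfalso
      rcases hB.2.2.1 with h0 | hPB
      · omega
      · have := hA.2.2.2 xB hlt hB.2.1
        rw [hceq] at this
        exact hPB this
    · exact heq
    · exfalso
      rcases hA.2.2.1 with h0 | hPA
      · omega
      · have := hB.2.2.2 xA (by omega) hA.2.1
        rw [hceq] at hPA
        exact hPA this
  rw [hxeq, hceq]
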